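-- pv_equiv track=rewrite | github.com/xaliq2299/UFAZ-BSc | L3/S1/CSfPh/hands-on/dict2.py | func
-- ===== SOURCE A (Python) =====
-- def func(string):
--   myDict={}
--   alphabet='abcdefghijklmnopqrstuvwxyz'
--   for k in alphabet:
--     myDict[k]=0
--   for k in string:
--     if k in myDict.keys():
--       myDict[k] = 1
--   return myDict
-- ===== SOURCE B (Python) =====
-- def func(string):
--   seen = set(string)
--   return {c: (1 if c in seen else 0) for c in 'abcdefghijklmnopqrstuvwxyz'}
-- ===== Notes on version B (the rewrite author's own statement) =====
-- stated objective: idiomatic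
-- what changed: B builds a membership set of the input once and produces the result by a dict comprehension over the fixed alphabet, instead of pre-seeding a 26-key dict with zeros and marking keys while scanning the input; the input scan becomes a C-level set() construction instead of a Python-level loop with a keys() test and dict store per character.
import Mathlib
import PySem

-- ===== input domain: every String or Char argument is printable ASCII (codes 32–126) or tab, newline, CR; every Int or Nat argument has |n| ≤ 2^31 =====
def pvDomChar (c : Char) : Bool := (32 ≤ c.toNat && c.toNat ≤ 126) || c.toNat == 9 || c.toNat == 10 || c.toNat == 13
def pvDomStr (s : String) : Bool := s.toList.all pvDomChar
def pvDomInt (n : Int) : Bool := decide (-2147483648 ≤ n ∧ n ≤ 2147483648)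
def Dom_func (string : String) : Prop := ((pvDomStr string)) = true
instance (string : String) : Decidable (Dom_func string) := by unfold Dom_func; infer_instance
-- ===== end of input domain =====

-- B replaces A's pre-seeded mark-while-scanning dict by a set of the input's characters
-- plus a comprehension over the fixed alphabet (objective: more idiomatic; same asymptotic cost).

-- ===== PORT A =====
def func (string : String) : List (String × Int) :=
  let alphabet := "abcdefghijklmnopqrstuvwxyz"
  let d0 : PySem.Dict String Int :=
    alphabet.toList.foldl (fun d k => d.insert (String.singleton k) 0) PySem.Dict.empty
  let d :=
    string.toList.foldl
      (fun d k =>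
        if d.keys.contains (String.singleton k) then d.insert (String.singleton k) 1 else d)
      d0
  d.items

-- ===== PORT B =====
def func_alt (string : String) : List (String × Int) :=
  let seen : PySem.Set Char := PySem.Set.ofList string.toList
  "abcdefghijklmnopqrstuvwxyz".toList.map
    (fun c => (String.singleton c, if c ∈ seen then (1 : Int) else 0))

-- ===== PRECONDITION & SPEC =====
def Spec_func (string : String) (out : List (String × Int)) : Prop := out = func_alt string
instance (string : String) (out : List (String × Int)) : Decidable (Spec_func string out) := by unfold Spec_func; infer_instance

-- ===== CLAIM (what is proved, stated in full; the proofs are below) =====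
def Claim_equal_func : Prop := ∀ (string : String), Dom_func string → Spec_func string (func string)

-- ===== LEMMAS AND PROOFS =====

-- the alphabet as a list of characters, and the dict of A parametrised by its value function
def pvAL : List Char := "abcdefghijklmnopqrstuvwxyz".toList

def pvD (f : Char → Int) : PySem.Dict String Int :=
  PySem.Dict.mk (pvAL.map (fun c => (String.singleton c, f c)))

theorem pv_singleton_inj {a b : Char} (h : String.singleton a = String.singleton b) : a = b := by
  have := congrArg String.toList h
  simpa [String.singleton] using this

theorem pvD_congr {f g : Char → Int} (h : ∀ c ∈ pvAL, f c = g c) : pvD f = pvD g := by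
  apply PySem.Dict.ext
  simp only [pvD]
  exact List.map_congr_left (fun c hc => by rw [h c hc])

theorem pvD_keys (f : Char → Int) : (pvD f).keys = pvAL.map String.singleton := by
  simp [pvD, PySem.Dict.keys, List.map_map, Function.comp]

theorem pv_contains (f : Char → Int) (k : Char) :
    (pvD f).keys.contains (String.singleton k) = pvAL.contains k := by
  rw [pvD_keys]
  simp only [List.contains_eq_mem] at *
  by_cases hk : k ∈ pvAL
  · simp [hk, List.mem_map.mpr ⟨k, hk, rfl⟩]
  · have : String.singleton k ∉ pvAL.map String.singleton := by
      intro hmem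
      obtain ⟨c, hc, hceq⟩ := List.mem_map.mp hmem
      exact hk (pv_singleton_inj hceq ▸ hc)
    simp [hk, this]

theorem pv_step (f : Char → Int) (k : Char) :
    (if (pvD f).keys.contains (String.singleton k) then (pvD f).insert (String.singleton k) 1
     else pvD f)
      = pvD (fun c => if c = k then 1 else f c) := by
  rw [pv_contains]
  by_cases hk : k ∈ pvAL
  · simp only [List.contains_eq_mem, hk, decide_true, if_true]
    apply PySem.Dict.ext
    rw [PySem.Dict.items_insert_of_contains]
    · simp only [pvD, List.map_map]
      refine List.map_congr_left (fun c _ => ?_)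
      simp only [Function.comp]
      by_cases hck : c = k
      · subst hck; simp
      · have : (String.singleton c == String.singleton k) = false := by
          simp only [beq_eq_false_iff_ne, ne_eq]
          exact fun h => hck (pv_singleton_inj h)
        simp [this, hck]
    · rw [PySem.Dict.contains_iff_mem_keys, pvD_keys]
      exact List.mem_map.mpr ⟨k, hk, rfl⟩
  · simp only [List.contains_eq_mem, hk, decide_false]
    exact pvD_congr (fun c hc => by
      have : c ≠ k := fun h => hk (h ▸ hc)
      simp [this])

theorem pv_loop (l : List Char) (f : Char → Int) :
    l.foldl
        (fun d k =>
          if d.keys.contains (String.singleton k) then d.insert (String.singleton k) 1 else d)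
        (pvD f)
      = pvD (fun c => if c ∈ l then 1 else f c) := by
  induction l generalizing f with
  | nil => simp
  | cons k l ih =>
    simp only [List.foldl_cons, pv_step, ih]
    exact pvD_congr (fun c _ => by
      by_cases hcl : c ∈ l
      · simp [hcl]
      · by_cases hck : c = k <;> simp [hcl, hck])

theorem pv_d0 :
    ("abcdefghijklmnopqrstuvwxyz".toList.foldl
        (fun (d : PySem.Dict String Int) k => d.insert (String.singleton k) 0) PySem.Dict.empty)
      = pvD (fun _ => 0) := by decide

-- ===== VERDICT (by name: the statement is the Claim_ definition above) =====
theorem func_spec : Claim_equal_func := by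
  intro string _
  unfold Spec_func func func_alt
  simp only []
  rw [pv_d0, pv_loop]
  simp only [pvD]
  refine List.map_congr_left (fun c _ => ?_)
  simp [PySem.Set.mem_ofList]
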